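-- pv_equiv track=rewrite | github.com/Matt-Unterslak/advent-of-code-python | 2016/day_4/main.py | find_real_rooms
-- ===== SOURCE A (Python) =====
-- ALPHABET = "abcdefghijklmnopqrstuvwxyz"
--
-- def shift_letter(char: str, shifts: int):
--     current_index = ALPHABET.find(char)
--
--     if current_index + shifts < len(ALPHABET):
--         return ALPHABET[current_index + shifts]
--     else:
--         return ALPHABET[current_index + shifts - len(ALPHABET)]
--
-- def decrypt_name(encrypted_name: str, sector_id: int):
--     shifts = sector_id % 26
--     decrypted_name: str = ""
--     for x in encrypted_name:
--         if x == "-":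
--             decrypted_name += " "
--         else:
--             decrypted_name += shift_letter(x, shifts)
--     return decrypted_name
--
-- def get_keys_from_value(d, val):
--     return [k for k, v in d.items() if v == val]
--
-- def get_unique_character_count(encrypted_room_data: list[str]) -> str:
--     encrypted_data = "".join([x.lower() for x in encrypted_room_data])
--     char_count = {char: 0 for char in list(set(encrypted_data))}
--     for char in encrypted_data:
--         char_count[char] += 1
--     highest_char_first = {
--         k: v
--         for k, v in sorted(char_count.items(), key=lambda item: item[1], reverse=True)
--     }
--     values = sorted(list(set([v for v in highest_char_first.values()])), reverse=True)
--     chars_sorted_by_occurrence = "".join(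
--         ["".join(sorted(get_keys_from_value(highest_char_first, v))) for v in values]
--     )
--     return chars_sorted_by_occurrence
--
-- def find_real_rooms(input_str: str):
--     data: list[str] = input_str.split("\n")
--     real_room_sector_numbers: list[int] = []
--     north_pole_sector_id: int = 0
--     for room_info in data:
--         room_info = room_info.split("-")
--         sector_id, checksum = [x.strip("]") for x in room_info[-1].split("[")]
--         encrypted_room = room_info[0:-1]
--
--         unique_chars = get_unique_character_count(encrypted_room)
--
--         if unique_chars.startswith(checksum):
--             real_room_name: str = decrypt_name("-".join(encrypted_room), int(sector_id))
--             if real_room_name.startswith("northpole"):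
--                 north_pole_sector_id = int(sector_id)
--             real_room_sector_numbers.append(int(sector_id))
--
--     return sum(real_room_sector_numbers), north_pole_sector_id
-- ===== SOURCE B (Python) =====
-- def find_real_rooms(input_str: str):
--     total = 0
--     north_pole_sector_id = 0
--     for line in input_str.split("\n"):
--         parts = line.split("-")
--         sector_s, checksum = [p.strip("]") for p in parts[-1].split("[")]
--         name_parts = parts[:-1]
--         counts = {}
--         for ch in "".join(p.lower() for p in name_parts):
--             counts[ch] = counts.get(ch, 0) + 1
--         order = "".join(sorted(counts, key=lambda c: (-counts[c], c)))
--         if order.startswith(checksum):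
--             sid = int(sector_s)
--             shift = sid % 26
--             decrypted = "".join(
--                 " " if c == "-" else chr((ord(c) - 97 + shift) % 26 + 97)
--                 for c in "-".join(name_parts)
--             )
--             if decrypted.startswith("northpole"):
--                 north_pole_sector_id = sid
--             total += sid
--     return total, north_pole_sector_id
-- ===== Notes on version B (the rewrite author's own statement) =====
-- stated objective: simpler
-- what changed: The checksum string is produced by one counting dict and a single sort keyed on (-count, char), replacing A's zero-initialised dict over list(set(...)), value-sorted dict rebuild, unique-value set and per-value get_keys_from_value grouping; the sector list + sum becomes a running total and the letter shift becomes (ord(c)-97+shift)%26+97 modular arithmetic instead of ALPHABET.find plus branch-indexed lookup.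
-- outside the precondition, e.g. on find_real_rooms('a-+7[a]'): A returns (7, 0), B returns (7, 0); on find_real_rooms('@adftbaxq-14[a@bdf]'): A returns (14, 14), B returns (14, 0)
import Mathlib
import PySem

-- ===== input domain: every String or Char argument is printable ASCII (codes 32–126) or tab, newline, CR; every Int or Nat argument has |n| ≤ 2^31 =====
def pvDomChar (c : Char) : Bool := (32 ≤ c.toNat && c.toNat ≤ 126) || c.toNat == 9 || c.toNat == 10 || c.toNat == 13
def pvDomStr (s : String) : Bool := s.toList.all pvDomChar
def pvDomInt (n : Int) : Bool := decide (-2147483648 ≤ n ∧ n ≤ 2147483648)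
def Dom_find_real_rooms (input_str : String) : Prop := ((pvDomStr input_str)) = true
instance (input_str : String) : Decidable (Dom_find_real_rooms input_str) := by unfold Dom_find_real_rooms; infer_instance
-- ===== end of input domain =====

-- B replaces A's set/dict/group-by-value checksum machinery by one counting dict plus a single
-- (-count, char)-keyed sort, the sector list+sum by a running total, and the alphabet lookup by
-- modular arithmetic (objective: simpler).

-- ===== PORT A =====
def ALPHABET : String := "abcdefghijklmnopqrstuvwxyz"

def shift_letter (char : Char) (shifts : Int) : Char :=
  let current_index := PySem.Str.find ALPHABET (String.ofList [char])
  if current_index + shifts < PySem.Str.len ALPHABET then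
    (PySem.Str.pyGet? ALPHABET (current_index + shifts)).getD ' '          -- IndexError → excluded by Pre_
  else
    (PySem.Str.pyGet? ALPHABET (current_index + shifts - PySem.Str.len ALPHABET)).getD ' '

def decrypt_name (encrypted_name : List Char) (sector_id : Int) : List Char :=
  let shifts := PySem.Int.mod sector_id 26
  encrypted_name.foldl (fun acc x => if x == '-' then acc ++ [' '] else acc ++ [shift_letter x shifts]) []

def get_keys_from_value (d : PySem.Dict Char Int) (val : Int) : List Char :=
  (d.items.filter (fun kv => kv.2 == val)).map (fun kv => kv.1)

def get_unique_character_count (encrypted_room_data : List String) : List Char :=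
  let encrypted_data : List Char :=
    PySem.Chars.join [] (encrypted_room_data.map (fun x => PySem.Chars.lower x.toList))
  -- {char: 0 for char in list(set(encrypted_data))} — the result below is proved independent of set order
  let char_count0 : PySem.Dict Char Int :=
    (PySem.Set.ofList encrypted_data).foldl (fun d c => d.insert c 0) PySem.Dict.empty
  let char_count := encrypted_data.foldl (fun d c => d.modify c 0 (· + 1)) char_count0
  let highest_char_first : PySem.Dict Char Int :=
    (PySem.List.sorted char_count.items (fun item => item.2) true).foldl
      (fun d kv => d.insert kv.1 kv.2) PySem.Dict.empty
  let values := PySem.List.sorted (PySem.Set.ofList highest_char_first.values) (fun v => v) true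
  -- "".join of a list of 1-char strings is the char list itself
  PySem.Chars.join []
    (values.map (fun v => PySem.List.sorted (get_keys_from_value highest_char_first v) (fun k => k) false))

def find_real_rooms (input_str : String) : Int × Int :=
  let data := (PySem.Str.split? input_str "\n").getD []
  let st := data.foldl (fun (st : List Int × Int) room_info_s =>
    let room_info := (PySem.Str.split? room_info_s "-").getD []
    let sc := ((PySem.Str.split? ((PySem.List.pyGet? room_info (-1)).getD "") "[").getD []).map
      (fun x => PySem.Str.stripChars x "]")
    let sector_id := (PySem.List.pyGet? sc 0).getD ""       -- unpack: ≠ 2 pieces raises → excluded by Pre_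
    let checksum := (PySem.List.pyGet? sc 1).getD ""
    let encrypted_room := PySem.List.slice room_info none (some (-1))
    let unique_chars := get_unique_character_count encrypted_room
    if PySem.Chars.startswith unique_chars checksum.toList then
      let sid := (PySem.Int.ofStr? sector_id).getD 0        -- int() ValueError → excluded by Pre_
      let real_room_name := decrypt_name (PySem.Str.join "-" encrypted_room).toList sid
      (st.1 ++ [sid], if PySem.Chars.startswith real_room_name "northpole".toList then sid else st.2)
    else st) ([], 0)
  (st.1.sum, st.2)

-- ===== PORT B =====
def find_real_rooms_alt (input_str : String) : Int × Int :=
  ((PySem.Str.split? input_str "\n").getD []).foldl (fun (st : Int × Int) line =>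
    let parts := (PySem.Str.split? line "-").getD []
    let sc := ((PySem.Str.split? ((PySem.List.pyGet? parts (-1)).getD "") "[").getD []).map
      (fun p => PySem.Str.stripChars p "]")
    let sector_s := (PySem.List.pyGet? sc 0).getD ""
    let checksum := (PySem.List.pyGet? sc 1).getD ""
    let name_parts := PySem.List.slice parts none (some (-1))
    let counts : PySem.Dict Char Int :=
      (PySem.Chars.join [] (name_parts.map (fun p => PySem.Chars.lower p.toList))).foldl
        (fun d c => d.insert c (d.getD c 0 + 1)) PySem.Dict.empty
    let order : List Char := PySem.List.sorted2 counts.keys (fun c => -(counts.getD c 0)) (fun c => c) false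
    if PySem.Chars.startswith order checksum.toList then
      let sid := (PySem.Int.ofStr? sector_s).getD 0
      let shift := PySem.Int.mod sid 26
      let decrypted := PySem.Chars.join [] ((PySem.Str.join "-" name_parts).toList.map
        (fun c => if c == '-' then [' ']
                  else [Char.ofNat ((PySem.Int.mod ((c.toNat : Int) - 97 + shift) 26) + 97).toNat]))
      (st.1 + sid, if PySem.Chars.startswith decrypted "northpole".toList then sid else st.2)
    else st) (0, 0)

-- ===== PRECONDITION & SPEC =====
def pvGoodLine (line : String) : Bool :=
  let parts := (PySem.Str.split? line "-").getD []
  let sc := ((PySem.Str.split? ((PySem.List.pyGet? parts (-1)).getD "") "[").getD []).map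
    (fun x => PySem.Str.stripChars x "]")
  let sector := ((PySem.List.pyGet? sc 0).getD "").toList
  let checksum := ((PySem.List.pyGet? sc 1).getD "").toList
  let ed := PySem.Chars.join [] ((parts.dropLast).map (fun p => PySem.Chars.lower p.toList))
  sc.length == 2 &&
  ((parts.dropLast.all (fun p => p.toList.all (fun c => 'a' ≤ c && c ≤ 'z')) &&
    (!sector.isEmpty && sector.all (fun c => '0' ≤ c && c ≤ '9'))) ||
   checksum.any (fun c => !(ed.contains c)))

-- Pre_ admits lines with exactly one "[" in the last dash-segment whose name parts are lowercase
-- letters with a plain-digit sector (the puzzle's natural domain), and any such line whose checksum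
-- names a letter absent from the name (it can never validate, so both programs skip it).  Outside
-- that A can raise (unpacking ≠ 2 pieces, int() ValueError); names with characters outside a-z are
-- outside the puzzle's room format (there A decrypts them through ALPHABET.find = -1, i.e. a
-- negative Python index); sectors int() accepts beyond plain digits (e.g. '+7') are also out.
def Pre_find_real_rooms (input_str : String) : Prop :=
  ∀ line ∈ (PySem.Str.split? input_str "\n").getD [], pvGoodLine line = true
instance (input_str : String) : Decidable (Pre_find_real_rooms input_str) := by
  unfold Pre_find_real_rooms; infer_instance

def pvWitness_find_real_rooms : String := "aaaaa-bbb-z-y-x-123[abxyz]"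

def Spec_find_real_rooms (input_str : String) (out : Int × Int) : Prop := out = find_real_rooms_alt input_str
instance (input_str : String) (out : Int × Int) : Decidable (Spec_find_real_rooms input_str out) := by unfold Spec_find_real_rooms; infer_instance

-- ===== CLAIM (what is proved, stated in full; the proofs are below) =====
def Claim_equal_find_real_rooms : Prop := ∀ (input_str : String), Dom_find_real_rooms input_str → Pre_find_real_rooms input_str → Spec_find_real_rooms input_str (find_real_rooms input_str)

-- ===== LEMMAS AND PROOFS =====

theorem pv_sorted2_eq_sorted_toLex {α : Type} {κ₁ κ₂ : Type} [LinearOrder κ₁] [LinearOrder κ₂]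
    (xs : List α) (k1 : α → κ₁) (k2 : α → κ₂) :
    PySem.List.sorted2 xs k1 k2 false = PySem.List.sorted xs (fun x => toLex (k1 x, k2 x)) false := by
  have hlt : (fun a b => decide (k1 a < k1 b) || (!decide (k1 b < k1 a) && decide (k2 a < k2 b)))
      = (fun a b => decide (toLex (k1 a, k2 a) < toLex (k1 b, k2 b))) := by
    funext a b
    by_cases h1 : k1 a < k1 b
    · simp [h1, Prod.Lex.toLex_lt_toLex]
    · by_cases h2 : k1 b < k1 a
      · simp [h1, h2, Prod.Lex.toLex_lt_toLex, (ne_of_gt h2 : k1 a ≠ k1 b)]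
      · have he : k1 a = k1 b := le_antisymm (not_lt.1 h2) (not_lt.1 h1)
        simp [Prod.Lex.toLex_lt_toLex, he]
  rw [PySem.List.sorted_eq_foldl_insertBy]
  simp only [PySem.List.sorted2, Bool.false_eq_true, if_false, hlt]

theorem pv_getD_insert0 (K : List Char) (d : PySem.Dict Char Int)
    (h : ∀ c, d.getD c 0 = 0) : ∀ c, (K.foldl (fun d c => d.insert c 0) d).getD c 0 = 0 := by
  induction K generalizing d with
  | nil => exact h
  | cons a t ih =>
    intro c
    refine ih (d.insert a 0) ?_ c
    intro c'
    rw [PySem.Dict.getD_insert]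
    split <;> simp [h]

theorem pv_foldl_add_disjoint (l : List Char) : ∀ (s : PySem.Set Char), l.Nodup →
    (∀ x ∈ l, x ∉ s) → l.foldl PySem.Set.add s = s ++ l := by
  induction l with
  | nil => simp
  | cons a t ih =>
    intro s hnd hdisj
    have hc : s.contains a = false := by
      rw [Bool.eq_false_iff]
      intro hh
      exact hdisj a (by simp) ((PySem.Set.contains_iff s a).1 hh)
    have hadd : s.add a = s ++ [a] := by simp [PySem.Set.add, hdisj a (by simp)]
    simp only [List.foldl_cons, hadd]
    rw [ih (s ++ [a]) (List.nodup_cons.1 hnd).2]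
    · simp
    · intro x hx hmem
      rcases List.mem_append.1 hmem with h1 | h2
      · exact hdisj x (by simp [hx]) h1
      · simp at h2; subst h2; exact (List.nodup_cons.1 hnd).1 hx

theorem pv_ofList_nodup (K : List Char) (h : K.Nodup) : PySem.Set.ofList K = K := by
  have := pv_foldl_add_disjoint K [] h (by simp)
  simpa [PySem.Set.ofList, PySem.Set.empty] using this

theorem pv_update_mem (xs : List Char) : ∀ (s : PySem.Set Char), (∀ x ∈ xs, x ∈ s) →
    PySem.Set.update s xs = s := by
  induction xs with
  | nil => intro s _; rfl
  | cons a t ih =>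
    intro s h
    have hc : s.contains a = true := (PySem.Set.contains_iff s a).2 (h a (by simp))
    have : s.add a = s := by simp [PySem.Set.add, (PySem.Set.contains_iff s a).1 hc]
    simp only [PySem.Set.update, List.foldl_cons, this]
    exact ih s (fun x hx => h x (by simp [hx]))

theorem pv_flatten_perm_congr {α β : Type} (V : List α) (f g : α → List β)
    (h : ∀ v ∈ V, (f v).Perm (g v)) : ((V.map f).flatten).Perm ((V.map g).flatten) := by
  induction V with
  | nil => rfl
  | cons a t ih =>
    simp only [List.map_cons, List.flatten_cons]
    exact (h a (by simp)).append (ih (fun v hv => h v (by simp [hv])))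

theorem pv_partition_perm (V : List Int) : ∀ (P : List (Char × Int)), V.Nodup →
    (∀ p ∈ P, p.2 ∈ V) →
    ((V.map (fun v => P.filter (fun p => p.2 == v))).flatten).Perm P := by
  induction V with
  | nil =>
    intro P _ hmem
    cases P with
    | nil => rfl
    | cons p t => exact absurd (hmem p (by simp)) (by simp)
  | cons v V' ih =>
    intro P hnd hmem
    simp only [List.map_cons, List.flatten_cons]
    have hvV : v ∉ V' := (List.nodup_cons.1 hnd).1
    have hfilter : ∀ u ∈ V', P.filter (fun p => p.2 == u)
        = (P.filter (fun p => !(p.2 == v))).filter (fun p => p.2 == u) := by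
      intro u hu
      rw [List.filter_filter]
      apply List.filter_congr
      intro p _
      by_cases hpu : p.2 = u
      · have huv : ¬ u = v := fun hh => hvV (hh ▸ hu)
        simp [hpu, huv]
      · simp [hpu]
    have hmap : V'.map (fun v' => P.filter (fun p => p.2 == v'))
        = V'.map (fun v' => (P.filter (fun p => !(p.2 == v))).filter (fun p => p.2 == v')) :=
      List.map_congr_left hfilter
    rw [hmap]
    have hperm2 := ih (P.filter (fun p => !(p.2 == v))) (List.nodup_cons.1 hnd).2 ?_
    · exact (List.Perm.append_left _ hperm2).trans (List.filter_append_perm _ P)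
    · intro p hp
      have h1 := List.of_mem_filter hp
      have h2 := hmem p (List.mem_of_mem_filter hp)
      simp only [Bool.not_eq_eq_eq_not, Bool.not_true, beq_eq_false_iff_ne, ne_eq] at h1
      simp only [List.mem_cons] at h2
      rcases h2 with h2 | h2
      · exact absurd h2 h1
      · exact h2

theorem pv_join_nil (ls : List (List Char)) : PySem.Chars.join [] ls = ls.flatten := by
  simp only [PySem.Chars.join, List.intercalate]
  induction ls with
  | nil => rfl
  | cons a t ih =>
    cases t with
    | nil => simp
    | cons b t2 => simp_all [List.intersperse]

theorem pv_core (s : List Char) (P : List (Char × Int))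
    (hPerm : P.Perm ((PySem.Set.ofList s).map (fun k => (k, (s.count k : Int))))) :
    PySem.Chars.join []
      ((PySem.List.sorted (PySem.Set.ofList (P.map (fun kv => kv.2))) (fun v => v) true).map
        (fun v => PySem.List.sorted ((P.filter (fun kv => kv.2 == v)).map (fun kv => kv.1)) (fun k => k) false))
    = PySem.List.sorted (PySem.Set.ofList s) (fun c => toLex (-(s.count c : Int), c)) false := by
  have hshape : ∀ p ∈ P, p.2 = (s.count p.1 : Int) := by
    intro p hp
    obtain ⟨k, hk, hkeq⟩ := List.mem_map.1 (hPerm.mem_iff.1 hp)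
    rw [← hkeq]
  have hfst : (P.map (fun kv => kv.1)).Perm (PySem.Set.ofList s) := by
    have := hPerm.map (fun kv : Char × Int => kv.1)
    simpa [List.map_map, Function.comp_def] using this
  have hnodupfst : (P.map (fun kv => kv.1)).Nodup :=
    (hfst.nodup_iff).2 (PySem.Set.nodup_ofList s)
  -- the value list
  have hVperm : (PySem.List.sorted (PySem.Set.ofList (P.map (fun kv => kv.2))) (fun v => v) true).Perm
      (PySem.Set.ofList (P.map (fun kv => kv.2))) := PySem.List.sorted_perm _ _ _
  have hVnodup := hVperm.nodup_iff.2 (PySem.Set.nodup_ofList _)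
  have hVgt : (PySem.List.sorted (PySem.Set.ofList (P.map (fun kv => kv.2))) (fun v => v) true).Pairwise
      (fun a b => b < a) := by
    have h1 := PySem.List.sorted_pairwise_rev (PySem.Set.ofList (P.map (fun kv => kv.2))) (fun v => v)
    exact (h1.and hVnodup).imp (fun {a b} hab => lt_of_le_of_ne hab.1 (Ne.symm hab.2))
  have hVmem : ∀ v ∈ PySem.List.sorted (PySem.Set.ofList (P.map (fun kv => kv.2))) (fun v => v) true,
      v ∈ P.map (fun kv => kv.2) := by
    intro v hv
    exact (PySem.Set.mem_ofList _ _).1 ((PySem.List.mem_sorted _ _ _ _).1 hv)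
  have hmemV : ∀ p ∈ P, p.2 ∈ PySem.List.sorted (PySem.Set.ofList (P.map (fun kv => kv.2))) (fun v => v) true := by
    intro p hp
    exact (PySem.List.mem_sorted _ _ _ _).2 ((PySem.Set.mem_ofList _ _).2 (List.mem_map_of_mem hp))
  set V := PySem.List.sorted (PySem.Set.ofList (P.map (fun kv => kv.2))) (fun v => v) true with hVdef
  set G := fun v => PySem.List.sorted ((P.filter (fun kv => kv.2 == v)).map (fun kv => kv.1)) (fun k => k) false with hGdef
  -- membership in a group pins the count
  have hGmem : ∀ v, ∀ c ∈ G v, c ∈ PySem.Set.ofList s ∧ (s.count c : Int) = v := by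
    intro v c hc
    rw [hGdef] at hc
    obtain ⟨p, hpf, hp1⟩ := List.mem_map.1 ((PySem.List.mem_sorted _ _ _ _).1 hc)
    have hpP := List.mem_of_mem_filter hpf
    have hpv : p.2 = v := by simpa using List.of_mem_filter hpf
    refine ⟨?_, ?_⟩
    · exact hfst.subset (hp1 ▸ List.mem_map_of_mem hpP)
    · rw [← hp1, ← hshape p hpP]; exact hpv
  -- permutation
  have hperm : ((V.map G).flatten).Perm (PySem.Set.ofList s) := by
    have h1 : ((V.map G).flatten).Perm
        ((V.map (fun v => (P.filter (fun kv => kv.2 == v)).map (fun kv => kv.1))).flatten) := by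
      apply pv_flatten_perm_congr
      intro v _
      exact PySem.List.sorted_perm _ _ _
    have h2 : (V.map (fun v => (P.filter (fun kv => kv.2 == v)).map (fun kv => kv.1))).flatten
        = ((V.map (fun v => P.filter (fun kv => kv.2 == v))).flatten).map (fun kv => kv.1) := by
      rw [List.map_flatten, List.map_map]
      rfl
    have h3 : ((V.map (fun v => P.filter (fun kv => kv.2 == v))).flatten).Perm P :=
      pv_partition_perm V P hVnodup hmemV
    have h4 := h3.map (fun kv : Char × Int => kv.1)
    rw [← h2] at h4
    exact (h1.trans h4).trans hfst
  -- pairwise strict order under the lexicographic key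
  have hpair : ((V.map G).flatten).Pairwise
      (fun a b => (fun c => toLex (-(s.count c : Int), c)) a < (fun c => toLex (-(s.count c : Int), c)) b) := by
    rw [List.pairwise_flatten]
    constructor
    · intro l hl
      obtain ⟨v, hv, rfl⟩ := List.mem_map.1 hl
      have hnd : (G v).Nodup := by
        have hsub : ((P.filter (fun kv => kv.2 == v)).map (fun kv => kv.1)).Sublist
            (P.map (fun kv => kv.1)) :=
          List.Sublist.map (fun kv => kv.1)
            (List.filter_sublist : (P.filter (fun kv => kv.2 == v)).Sublist P)
        exact ((PySem.List.sorted_perm _ _ _).nodup_iff).2 (hnodupfst.sublist hsub)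
      have hle : (G v).Pairwise (fun a b => a ≤ b) := by
        have := PySem.List.sorted_pairwise ((P.filter (fun kv => kv.2 == v)).map (fun kv => kv.1)) (fun k => k)
        exact this
      refine ((hle.and hnd).imp_of_mem ?_)
      intro a b ha hb hab
      have hca := (hGmem v a ha).2
      have hcb := (hGmem v b hb).2
      simp only [Prod.Lex.toLex_lt_toLex]
      exact Or.inr ⟨by omega, lt_of_le_of_ne hab.1 hab.2⟩
    · rw [List.pairwise_map]
      refine hVgt.imp_of_mem ?_
      intro v₁ v₂ hv₁ hv₂ hlt x hx y hy
      have hcx := (hGmem v₁ x hx).2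
      have hcy := (hGmem v₂ y hy).2
      simp only [Prod.Lex.toLex_lt_toLex]
      exact Or.inl (by omega)
  rw [pv_join_nil]
  exact (PySem.List.sorted_eq_of_perm_of_pairwise_lt _ _ _ hperm hpair).symm

theorem pv_dict_empty_getD (c : Char) : (PySem.Dict.empty : PySem.Dict Char Int).getD c 0 = 0 := rfl

theorem pv_cc_items (s : List Char) :
    (s.foldl (fun d c => d.modify c 0 (· + 1))
      ((PySem.Set.ofList s).foldl (fun d c => d.insert c 0) PySem.Dict.empty)).items
    = (PySem.Set.ofList s).map (fun k => (k, (s.count k : Int))) := by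
  have hkeys0 : ((PySem.Set.ofList s).foldl (fun d c => d.insert c 0) (PySem.Dict.empty : PySem.Dict Char Int)).keys
      = PySem.Set.ofList s :=
    (PySem.Dict.keys_foldl_insert (PySem.Set.ofList s) (fun _ _ => (0 : Int)) PySem.Dict.empty).trans
      (pv_ofList_nodup _ (PySem.Set.nodup_ofList s))
  have hkeys : (s.foldl (fun d c => d.modify c 0 (· + 1))
      ((PySem.Set.ofList s).foldl (fun d c => d.insert c 0) (PySem.Dict.empty : PySem.Dict Char Int))).keys
      = PySem.Set.ofList s :=
    (PySem.Dict.keys_foldl_modify s 0 (fun d x v => v + 1) _).trans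
      ((congrArg (fun l => PySem.Set.update l s) hkeys0).trans
        (pv_update_mem s _ (fun x hx => (PySem.Set.mem_ofList s x).2 hx)))
  have hgetD : ∀ c, (s.foldl (fun d c => d.modify c 0 (· + 1))
      ((PySem.Set.ofList s).foldl (fun d c => d.insert c 0) (PySem.Dict.empty : PySem.Dict Char Int))).getD c 0
      = (s.count c : Int) := by
    intro c
    rw [PySem.Dict.getD_foldl_modify_add_one]
    rw [pv_getD_insert0 (PySem.Set.ofList s) PySem.Dict.empty pv_dict_empty_getD c]
    simp
  have hnd : (s.foldl (fun d c => d.modify c 0 (· + 1))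
      ((PySem.Set.ofList s).foldl (fun d c => d.insert c 0) (PySem.Dict.empty : PySem.Dict Char Int))).keys.Nodup := by
    rw [hkeys]; exact PySem.Set.nodup_ofList s
  refine (PySem.Dict.items_eq_map_keys _ hnd 0).trans ?_
  refine (congrArg (List.map _) hkeys).trans ?_
  exact List.map_congr_left (fun k _ => by rw [hgetD k])

theorem pv_hcf_items (l : List (Char × Int)) (h : (l.map (fun kv => kv.1)).Nodup) :
    (l.foldl (fun d kv => d.insert kv.1 kv.2) (PySem.Dict.empty : PySem.Dict Char Int)).items = l := by
  have := PySem.Dict.items_foldl_insert_fresh l (fun kv => kv.1) (fun kv => kv.2)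
    (PySem.Dict.empty : PySem.Dict Char Int) (fun a _ => rfl) h
  simpa using this


theorem pv_gucc_canon (rooms : List String) :
    get_unique_character_count rooms
    = PySem.List.sorted
        (PySem.Set.ofList (PySem.Chars.join [] (rooms.map (fun x => PySem.Chars.lower x.toList))))
        (fun c => toLex (-(((PySem.Chars.join [] (rooms.map (fun x => PySem.Chars.lower x.toList))).count c : Int)), c))
        false := by
  simp only [get_unique_character_count, get_keys_from_value]
  rw [pv_cc_items]
  have hPperm : (PySem.List.sorted
      ((PySem.Set.ofList (PySem.Chars.join [] (rooms.map (fun x => PySem.Chars.lower x.toList)))).map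
        (fun k => (k, ((PySem.Chars.join [] (rooms.map (fun x => PySem.Chars.lower x.toList))).count k : Int))))
      (fun item => item.2) true).Perm
      ((PySem.Set.ofList (PySem.Chars.join [] (rooms.map (fun x => PySem.Chars.lower x.toList)))).map
        (fun k => (k, ((PySem.Chars.join [] (rooms.map (fun x => PySem.Chars.lower x.toList))).count k : Int)))) :=
    PySem.List.sorted_perm _ _ _
  have hPnodup : ((PySem.List.sorted
      ((PySem.Set.ofList (PySem.Chars.join [] (rooms.map (fun x => PySem.Chars.lower x.toList)))).map
        (fun k => (k, ((PySem.Chars.join [] (rooms.map (fun x => PySem.Chars.lower x.toList))).count k : Int))))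
      (fun item => item.2) true).map (fun kv => kv.1)).Nodup := by
    have h1 : (((PySem.Set.ofList (PySem.Chars.join [] (rooms.map (fun x => PySem.Chars.lower x.toList)))).map
        (fun k => (k, ((PySem.Chars.join [] (rooms.map (fun x => PySem.Chars.lower x.toList))).count k : Int)))).map
        (fun kv => kv.1)) = PySem.Set.ofList (PySem.Chars.join [] (rooms.map (fun x => PySem.Chars.lower x.toList))) := by
      simp [List.map_map, Function.comp_def]
    exact ((hPperm.map _).nodup_iff).2 (by rw [h1]; exact PySem.Set.nodup_ofList _)
  have hitems := pv_hcf_items _ hPnodup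
  have hval : ((PySem.List.sorted
      ((PySem.Set.ofList (PySem.Chars.join [] (rooms.map (fun x => PySem.Chars.lower x.toList)))).map
        (fun k => (k, ((PySem.Chars.join [] (rooms.map (fun x => PySem.Chars.lower x.toList))).count k : Int))))
      (fun item => item.2) true).foldl (fun d kv => d.insert kv.1 kv.2) (PySem.Dict.empty : PySem.Dict Char Int)).values
      = (PySem.List.sorted
      ((PySem.Set.ofList (PySem.Chars.join [] (rooms.map (fun x => PySem.Chars.lower x.toList)))).map
        (fun k => (k, ((PySem.Chars.join [] (rooms.map (fun x => PySem.Chars.lower x.toList))).count k : Int))))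
      (fun item => item.2) true).map (fun kv => kv.2) := by
    show (((PySem.List.sorted
      ((PySem.Set.ofList (PySem.Chars.join [] (rooms.map (fun x => PySem.Chars.lower x.toList)))).map
        (fun k => (k, ((PySem.Chars.join [] (rooms.map (fun x => PySem.Chars.lower x.toList))).count k : Int))))
      (fun item => item.2) true).foldl
      (fun d kv => d.insert kv.1 kv.2) (PySem.Dict.empty : PySem.Dict Char Int)).items).map (fun kv => kv.2) = _
    rw [hitems]
  rw [hval, hitems]
  exact pv_core _ _ hPperm

theorem pv_shift_fin : ∀ (k j : Fin 26),
    shift_letter (Char.ofNat (97 + k.val)) ((j.val : Int)) = Char.ofNat (97 + ((k.val + j.val) % 26)) := by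
  decide

theorem pv_shift_char (c : Char) (s : Int) (hc1 : 'a' ≤ c) (hc2 : c ≤ 'z')
    (hs0 : 0 ≤ s) (hs1 : s < 26) :
    shift_letter c s = Char.ofNat ((PySem.Int.mod ((c.toNat : Int) - 97 + s) 26) + 97).toNat := by
  have hc1' : 97 ≤ c.toNat := hc1
  have hc2' : c.toNat ≤ 122 := hc2
  have hk : c.toNat - 97 < 26 := by omega
  have hj : s.toNat < 26 := by omega
  have hceq : c = Char.ofNat (97 + (c.toNat - 97)) := by
    have : 97 + (c.toNat - 97) = c.toNat := by omega
    rw [this]; exact (Char.ofNat_toNat c).symm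
  have hseq : s = ((s.toNat : Int)) := by omega
  rw [hceq, hseq, pv_shift_fin ⟨c.toNat - 97, hk⟩ ⟨s.toNat, hj⟩]
  congr 1
  have h1 : ((Char.ofNat (97 + (c.toNat - 97))).toNat : Int) = (c.toNat : Int) := by
    rw [← hceq]
  rw [h1]
  rw [PySem.Int.mod_eq_emod_of_pos (by norm_num)]
  simp only []
  omega

theorem pv_decrypt_eq (cs : List Char) (sid : Int)
    (h : ∀ c ∈ cs, c = '-' ∨ ('a' ≤ c ∧ c ≤ 'z')) :
    decrypt_name cs sid =
      PySem.Chars.join [] (cs.map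
        (fun c => if c == '-' then [' ']
                  else [Char.ofNat ((PySem.Int.mod ((c.toNat : Int) - 97 + PySem.Int.mod sid 26) 26) + 97).toNat])) := by
  have hb : (fun (acc : List Char) (x : Char) =>
      if x == '-' then acc ++ [' '] else acc ++ [shift_letter x (PySem.Int.mod sid 26)])
      = (fun acc x => acc ++ [if x == '-' then ' ' else shift_letter x (PySem.Int.mod sid 26)]) := by
    funext acc x
    by_cases hx : x == '-' <;> simp [hx]
  have hrhs : (cs.map (fun c => if c == '-' then [' ']
      else [Char.ofNat ((PySem.Int.mod ((c.toNat : Int) - 97 + PySem.Int.mod sid 26) 26) + 97).toNat]))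
      = (cs.map (fun c => if c == '-' then ' '
      else Char.ofNat ((PySem.Int.mod ((c.toNat : Int) - 97 + PySem.Int.mod sid 26) 26) + 97).toNat)).map (fun c => [c]) := by
    rw [List.map_map]
    apply List.map_congr_left
    intro x _
    exact (apply_ite (fun c : Char => [c]) (x == '-')
      ' ' (Char.ofNat ((PySem.Int.mod ((x.toNat : Int) - 97 + PySem.Int.mod sid 26) 26) + 97).toNat)).symm
  rw [hrhs, PySem.Chars.join_nil_singletons]
  show cs.foldl _ [] = _
  rw [hb, PySem.List.foldl_append_singleton_eq_map]
  rw [List.nil_append]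
  apply List.map_congr_left
  intro x hx
  rcases h x hx with h1 | h2
  · simp [h1]
  · have hne : (x == '-') = false := by
      refine beq_eq_false_iff_ne.2 ?_
      intro he; rw [he] at h2; exact absurd h2.1 (by decide)
    simp only [hne]
    exact pv_shift_char x _ h2.1 h2.2
      (PySem.Int.mod_nonneg sid (by norm_num)) (PySem.Int.mod_lt sid (by norm_num))

theorem pv_slice_dropLast {α : Type} (xs : List α) :
    PySem.List.slice xs none (some (-1)) = xs.dropLast := by
  simp [pysem]

theorem pv_mem_join (sep : List Char) (parts : List (List Char)) (c : Char)
    (hc : c ∈ PySem.Chars.join sep parts) : c ∈ sep ∨ ∃ p ∈ parts, c ∈ p := by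
  induction parts with
  | nil => simp [PySem.Chars.join, List.intercalate] at hc
  | cons a t ih =>
    cases t with
    | nil =>
      simp only [PySem.Chars.join, List.intercalate, List.intersperse, List.flatten] at hc
      exact Or.inr ⟨a, by simp, by simpa using hc⟩
    | cons b t2 =>
      rw [PySem.Chars.join_cons_cons] at hc
      rcases List.mem_append.1 hc with h1 | h2
      · rcases List.mem_append.1 h1 with ha | hs
        · exact Or.inr ⟨a, by simp, ha⟩
        · exact Or.inl hs
      · rcases ih h2 with h | ⟨p, hp, hcp⟩
        · exact Or.inl h
        · exact Or.inr ⟨p, List.mem_cons_of_mem a hp, hcp⟩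

-- the per-line step functions (proof-side names for the ports' fold bodies)
def pvStepA (st : List Int × Int) (room_info_s : String) : List Int × Int :=
  let room_info := (PySem.Str.split? room_info_s "-").getD []
  let sc := ((PySem.Str.split? ((PySem.List.pyGet? room_info (-1)).getD "") "[").getD []).map
    (fun x => PySem.Str.stripChars x "]")
  let sector_id := (PySem.List.pyGet? sc 0).getD ""
  let checksum := (PySem.List.pyGet? sc 1).getD ""
  let encrypted_room := PySem.List.slice room_info none (some (-1))
  let unique_chars := get_unique_character_count encrypted_room
  if PySem.Chars.startswith unique_chars checksum.toList then
    let sid := (PySem.Int.ofStr? sector_id).getD 0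
    let real_room_name := decrypt_name (PySem.Str.join "-" encrypted_room).toList sid
    (st.1 ++ [sid], if PySem.Chars.startswith real_room_name "northpole".toList then sid else st.2)
  else st

def pvStepB (st : Int × Int) (line : String) : Int × Int :=
  let parts := (PySem.Str.split? line "-").getD []
  let sc := ((PySem.Str.split? ((PySem.List.pyGet? parts (-1)).getD "") "[").getD []).map
    (fun p => PySem.Str.stripChars p "]")
  let sector_s := (PySem.List.pyGet? sc 0).getD ""
  let checksum := (PySem.List.pyGet? sc 1).getD ""
  let name_parts := PySem.List.slice parts none (some (-1))
  let counts : PySem.Dict Char Int :=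
    (PySem.Chars.join [] (name_parts.map (fun p => PySem.Chars.lower p.toList))).foldl
      (fun d c => d.insert c (d.getD c 0 + 1)) PySem.Dict.empty
  let order : List Char := PySem.List.sorted2 counts.keys (fun c => -(counts.getD c 0)) (fun c => c) false
  if PySem.Chars.startswith order checksum.toList then
    let sid := (PySem.Int.ofStr? sector_s).getD 0
    let shift := PySem.Int.mod sid 26
    let decrypted := PySem.Chars.join [] ((PySem.Str.join "-" name_parts).toList.map
      (fun c => if c == '-' then [' ']
                else [Char.ofNat ((PySem.Int.mod ((c.toNat : Int) - 97 + shift) 26) + 97).toNat]))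
    (st.1 + sid, if PySem.Chars.startswith decrypted "northpole".toList then sid else st.2)
  else st

theorem pv_step (line : String) (h : pvGoodLine line = true) (st : List Int × Int) :
    pvStepB (st.1.sum, st.2) line = ((pvStepA st line).1.sum, (pvStepA st line).2) := by
  simp only [pvGoodLine, Bool.and_eq_true, Bool.or_eq_true] at h
  obtain ⟨hlen, hrest⟩ := h
  simp only [pvStepA, pvStepB]
  rw [pv_slice_dropLast]
  rw [PySem.Dict.foldl_insert_getD_add_one_eq_counter]
  rw [PySem.Dict.keys_counter]
  have hk1 : (fun c => -((PySem.Dict.counter (PySem.Chars.join []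
      ((((PySem.Str.split? line "-").getD []).dropLast).map (fun p => PySem.Chars.lower p.toList)))).getD c 0))
      = (fun c => -(((PySem.Chars.join []
      ((((PySem.Str.split? line "-").getD []).dropLast).map (fun p => PySem.Chars.lower p.toList))).count c : Int))) :=
    funext fun c => by rw [PySem.Dict.getD_counter]
  rw [hk1, pv_sorted2_eq_sorted_toLex]
  rw [← pv_gucc_canon ((((PySem.Str.split? line "-").getD []).dropLast))]
  rcases hrest with ⟨hlow, hsec⟩ | hmis
  · -- well-formed room line: names lowercase, digit sector
    have hchars : ∀ c ∈ (PySem.Str.join "-" (((PySem.Str.split? line "-").getD []).dropLast)).toList,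
        c = '-' ∨ ('a' ≤ c ∧ c ≤ 'z') := by
      intro c hc
      rw [PySem.Str.toList_join] at hc
      rcases pv_mem_join _ _ c hc with h | ⟨p, hp, hcp⟩
      · left; simpa using h
      · right
        obtain ⟨q, hq, rfl⟩ := List.mem_map.1 hp
        have h1 : q.toList.all (fun c => 'a' ≤ c && c ≤ 'z') = true := by
          simpa using (List.all_eq_true.1 hlow) q hq
        have h2 := (List.all_eq_true.1 h1) c hcp
        simpa using h2
    rw [← pv_decrypt_eq _ _ hchars]
    by_cases hcond : PySem.Chars.startswith
        (get_unique_character_count (((PySem.Str.split? line "-").getD []).dropLast))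
        ((PySem.List.pyGet? (((PySem.Str.split? ((PySem.List.pyGet? ((PySem.Str.split? line "-").getD []) (-1)).getD "") "[").getD []).map (fun x => PySem.Str.stripChars x "]")) 1).getD "").toList = true
    · simp [hcond, List.sum_append]
    · simp [hcond]
  · -- a checksum letter is absent from the name: the room can never validate
    have hfalse : PySem.Chars.startswith
        (get_unique_character_count (((PySem.Str.split? line "-").getD []).dropLast))
        ((PySem.List.pyGet? (((PySem.Str.split? ((PySem.List.pyGet? ((PySem.Str.split? line "-").getD []) (-1)).getD "") "[").getD []).map (fun x => PySem.Str.stripChars x "]")) 1).getD "").toList = false := by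
      obtain ⟨c, hcmem, hcnot⟩ := List.any_eq_true.1 hmis
      refine Bool.eq_false_iff.2 (fun htrue => ?_)
      have hpre := (PySem.Chars.startswith_iff _ _).1 htrue
      have hmem : c ∈ get_unique_character_count (((PySem.Str.split? line "-").getD []).dropLast) :=
        hpre.subset hcmem
      rw [pv_gucc_canon] at hmem
      have hed : c ∈ PySem.Chars.join []
          ((((PySem.Str.split? line "-").getD []).dropLast).map (fun p => PySem.Chars.lower p.toList)) :=
        (PySem.Set.mem_ofList _ _).1 ((PySem.List.mem_sorted _ _ _ _).1 hmem)
      simp only [Bool.not_eq_eq_eq_not, Bool.not_true] at hcnot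
      exact absurd ((List.contains_iff_mem).2 hed) (Bool.eq_false_iff.1 hcnot)
    simp [hfalse]

theorem pv_fold (data : List String) : ∀ (l : List Int) (n : Int),
    (∀ x ∈ data, pvGoodLine x = true) →
    data.foldl pvStepB (l.sum, n) = ((data.foldl pvStepA (l, n)).1.sum, (data.foldl pvStepA (l, n)).2) := by
  induction data with
  | nil => intro l n _; rfl
  | cons a t ih =>
    intro l n hg
    simp only [List.foldl_cons]
    rw [pv_step a (hg a (by simp)) (l, n)]
    simpa using ih (pvStepA (l, n) a).1 (pvStepA (l, n) a).2 (fun x hx => hg x (by simp [hx]))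

-- ===== VERDICT (by name: the statement is the Claim_ definition above) =====
theorem find_real_rooms_spec : Claim_equal_find_real_rooms := by
  intro input_str hdom hpre
  show find_real_rooms input_str = find_real_rooms_alt input_str
  have hpre' : ∀ x ∈ (PySem.Str.split? input_str "\n").getD [], pvGoodLine x = true := hpre
  have h := pv_fold ((PySem.Str.split? input_str "\n").getD []) [] 0 hpre'
  exact h.symm
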